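-- pv_equiv track=rewrite | github.com/tzimie/BellModules | MYSQLpy/MYSQLserver_open.py | replaceDB
-- ===== SOURCE A (Python) =====
-- def replaceDB(conn, newdb): # replace dbname= in conn string
--   m = []
--   for el in conn.split(" "):
--     if el.startswith('database='):
--       m.append('database='+newdb)
--     else:
--       m.append(el)
--   return ' '.join(m)
-- ===== SOURCE B (Python) =====
-- def replaceDB(conn, newdb): # replace dbname= in conn string
--     # single left-to-right character scan: accumulate the current space-delimited
--     # token, flush (rewritten if it starts with 'database=') at every space
--     out = []
--     tok = []
--     for ch in conn + ' ':
--         if ch == ' ':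
--             t = ''.join(tok)
--             if t.startswith('database='):
--                 t = 'database=' + newdb
--             out.append(t)
--             tok = []
--         else:
--             tok.append(ch)
--     return ' '.join(out)
-- ===== Notes on version B (the rewrite author's own statement) =====
-- stated objective: alternative
-- what changed: Replaced split-on-space/map/join with a single left-to-right character scan that accumulates the current token and flushes it (rewritten if it starts with 'database=') at each space.
import Mathlib
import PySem

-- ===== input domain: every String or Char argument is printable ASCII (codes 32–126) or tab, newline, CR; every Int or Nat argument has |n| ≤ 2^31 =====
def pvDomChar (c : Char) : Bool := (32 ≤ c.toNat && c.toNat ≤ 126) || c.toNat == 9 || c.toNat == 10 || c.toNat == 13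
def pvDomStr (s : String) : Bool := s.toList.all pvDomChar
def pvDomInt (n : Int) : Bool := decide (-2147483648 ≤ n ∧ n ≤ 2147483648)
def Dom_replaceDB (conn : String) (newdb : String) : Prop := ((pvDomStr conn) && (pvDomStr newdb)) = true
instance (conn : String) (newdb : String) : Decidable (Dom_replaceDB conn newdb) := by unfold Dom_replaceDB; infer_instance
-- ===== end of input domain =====

-- B replaces A's split/map/join with a single left-to-right character scan that
-- flushes the current token at each space (objective: alternative, same cost).

-- ===== PORT A =====
-- loop 'for el in conn.split(" "): if el.startswith("database="): m.append(...) else m.append(el)'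
def replaceDB (conn : String) (newdb : String) : String :=
  let m : List (List Char) :=
    (PySem.Chars.splitOn conn.toList [' ']).foldl
      (fun m el =>
        if PySem.Chars.startswith el ("database=".toList) then
          m ++ [("database=".toList ++ newdb.toList)]
        else
          m ++ [el])
      []
  String.ofList (PySem.Chars.join [' '] m)

-- ===== PORT B =====
-- 'if t.startswith("database="): t = "database=" + newdb'
def flushTok (newdb : List Char) (t : List Char) : List Char :=
  if PySem.Chars.startswith t ("database=".toList) then "database=".toList ++ newdb else t

-- 'for ch in conn + " ": if ch == " ": flush tok into out else tok.append(ch)'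
def replaceDB_alt (conn : String) (newdb : String) : String :=
  let st : List (List Char) × List Char :=
    (conn.toList ++ [' ']).foldl
      (fun st ch =>
        if ch = ' ' then (st.1 ++ [flushTok newdb.toList st.2], [])
        else (st.1, st.2 ++ [ch]))
      ([], [])
  String.ofList (PySem.Chars.join [' '] st.1)

-- ===== PRECONDITION & SPEC =====
def Spec_replaceDB (conn : String) (newdb : String) (out : String) : Prop := out = replaceDB_alt conn newdb
instance (conn : String) (newdb : String) (out : String) : Decidable (Spec_replaceDB conn newdb out) := by unfold Spec_replaceDB; infer_instance

-- ===== CLAIM (what is proved, stated in full; the proofs are below) =====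
def Claim_equal_replaceDB : Prop := ∀ (conn : String) (newdb : String), Dom_replaceDB conn newdb → Spec_replaceDB conn newdb (replaceDB conn newdb)

-- ===== LEMMAS AND PROOFS =====

-- reference split on a single space, producing the (possibly empty) tokens in order
def splitSp : List Char → List (List Char)
  | [] => [[]]
  | c :: rest =>
    if c = ' ' then [] :: splitSp rest
    else
      match splitSp rest with
      | t :: ts => (c :: t) :: ts
      | [] => [[c]]

def mapHead (f : List Char → List Char) : List (List Char) → List (List Char)
  | [] => []
  | t :: ts => f t :: ts

theorem splitSp_ne_nil (cs : List Char) : splitSp cs ≠ [] := by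
  cases cs with
  | nil => simp [splitSp]
  | cons c rest =>
    simp only [splitSp]
    split
    · simp
    · cases h : splitSp rest <;> simp

theorem go_eq (fuel : Nat) : ∀ (l cur : List Char) (acc : List (List Char)),
    l.length < fuel →
    PySem.Chars.splitOn.go [' '] fuel l cur acc
      = acc.reverse ++ mapHead (fun t => cur.reverse ++ t) (splitSp l) := by
  induction fuel with
  | zero => intro l cur acc h; omega
  | succ n ih =>
    intro l cur acc h
    cases l with
    | nil =>
      simp [PySem.Chars.splitOn.go, splitSp, mapHead]
    | cons c rest =>
      by_cases hc : c = ' '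
      · subst hc
        have : ([' '] : List Char).isPrefixOf (' ' :: rest) = true := by
          simp [List.isPrefixOf]
        rw [PySem.Chars.splitOn.go]
        simp only [this, if_pos, List.length_cons, List.length_nil, List.drop_succ_cons,
          List.drop_zero]
        rw [ih rest [] (cur.reverse :: acc) (by simpa using Nat.lt_of_succ_lt_succ h)]
        simp only [splitSp, mapHead, List.reverse_cons, List.append_assoc,
          List.singleton_append]
        cases hs : splitSp rest <;> simp
      · have hpre : ([' '] : List Char).isPrefixOf (c :: rest) = false := by
          simp [List.isPrefixOf]
          exact fun h => hc h.symm
        rw [PySem.Chars.splitOn.go]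
        simp only [hpre, Bool.false_eq_true, if_false]
        rw [ih rest (c :: cur) acc (by simpa using Nat.lt_of_succ_lt_succ h)]
        congr 1
        simp only [splitSp, hc, ite_false]
        cases hs : splitSp rest with
        | nil => exact absurd hs (splitSp_ne_nil rest)
        | cons t ts => simp [mapHead, List.reverse_cons]

theorem splitOn_eq_splitSp (cs : List Char) :
    PySem.Chars.splitOn cs [' '] = splitSp cs := by
  rw [PySem.Chars.splitOn, go_eq (cs.length + 1) cs [] [] (by omega)]
  cases h : splitSp cs with
  | nil => exact absurd h (splitSp_ne_nil cs)
  | cons t ts => simp [mapHead]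

-- A's accumulator loop is map of the per-token rewrite
theorem foldA_eq_map (newdb : List Char) : ∀ (l : List (List Char)) (m : List (List Char)),
    l.foldl
      (fun m el =>
        if PySem.Chars.startswith el ("database=".toList) then
          m ++ [("database=".toList ++ newdb)]
        else
          m ++ [el]) m
      = m ++ l.map (flushTok newdb) := by
  intro l
  induction l with
  | nil => simp
  | cons el rest ih =>
    intro m
    simp only [List.foldl_cons, List.map_cons]
    by_cases h : PySem.Chars.startswith el ("database=".toList) = true
    · rw [if_pos h, ih]
      simp only [flushTok]
      rw [if_pos h]
      simp
    · rw [if_neg h, ih]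
      simp only [flushTok]
      rw [if_neg h]
      simp

-- B's scan, from any (out, tok) state, flushes the rewritten tokens of tok ++ input
theorem mapHead_nil_append (l : List (List Char)) :
    mapHead (fun t => ([] : List Char) ++ t) l = l := by
  cases l <;> simp [mapHead]

theorem foldB_eq (newdb : List Char) : ∀ (cs : List Char) (out : List (List Char)) (tok : List Char),
    (cs ++ [' ']).foldl
      (fun st ch =>
        if ch = ' ' then (st.1 ++ [flushTok newdb st.2], ([] : List Char))
        else (st.1, st.2 ++ [ch]))
      (out, tok)
      = (out ++ (mapHead (fun t => tok ++ t) (splitSp cs)).map (flushTok newdb), []) := by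
  intro cs
  induction cs with
  | nil => intro out tok; simp [splitSp, mapHead]
  | cons c rest ih =>
    intro out tok
    by_cases hc : c = ' '
    · subst hc
      simp only [List.cons_append, List.foldl_cons]
      rw [if_pos trivial, ih, mapHead_nil_append]
      simp [splitSp, mapHead]
    · simp only [List.cons_append, List.foldl_cons, if_neg hc]
      rw [ih]
      simp only [splitSp, hc, ite_false]
      cases hs : splitSp rest with
      | nil => exact absurd hs (splitSp_ne_nil rest)
      | cons t ts => simp [mapHead]

-- ===== VERDICT (by name: the statement is the Claim_ definition above) =====
theorem replaceDB_spec : Claim_equal_replaceDB := by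
  intro conn newdb _
  unfold Spec_replaceDB replaceDB replaceDB_alt
  rw [foldB_eq, foldA_eq_map, splitOn_eq_splitSp, mapHead_nil_append]
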